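-- pv_equiv track=rewrite | github.com/castlejun-2/Algorithm | Programmers/Implementation/숫자 게임.py | solution
-- ===== SOURCE A (Python) =====
-- def solution(A, B):
--     answer = 0
--
--     A.sort(reverse=True)
--     B.sort(reverse=True)
--
--     for i in A:       #이길 수 있는 A의 갯수를 Count 한다.
--         if i < B[0]:
--             answer+=1
--             del B[0]
--
--     return answer
-- ===== SOURCE B (Python) =====
-- def solution(A, B):
--     # Two pointers over descending-sorted copies; index j instead of del B[0].
--     # Return-value equivalent to A; unlike A, does not mutate A or B.
--     a = sorted(A, reverse=True)
--     b = sorted(B, reverse=True)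
--     j = 0
--     for x in a:
--         if j < len(b) and x < b[j]:
--             j += 1
--     return j
-- ===== Notes on version B (the rewrite author's own statement) =====
-- stated objective: faster
-- what changed: Replaces the O(n) del B[0] of a mutated list inside the scan by an advancing index into a sorted copy (two pointers), removing the quadratic deletion cost; B also leaves its arguments unmutated.
-- outside the precondition, e.g. on solution([5, 4], [1]): A returns 0, B returns 0
import Mathlib
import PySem

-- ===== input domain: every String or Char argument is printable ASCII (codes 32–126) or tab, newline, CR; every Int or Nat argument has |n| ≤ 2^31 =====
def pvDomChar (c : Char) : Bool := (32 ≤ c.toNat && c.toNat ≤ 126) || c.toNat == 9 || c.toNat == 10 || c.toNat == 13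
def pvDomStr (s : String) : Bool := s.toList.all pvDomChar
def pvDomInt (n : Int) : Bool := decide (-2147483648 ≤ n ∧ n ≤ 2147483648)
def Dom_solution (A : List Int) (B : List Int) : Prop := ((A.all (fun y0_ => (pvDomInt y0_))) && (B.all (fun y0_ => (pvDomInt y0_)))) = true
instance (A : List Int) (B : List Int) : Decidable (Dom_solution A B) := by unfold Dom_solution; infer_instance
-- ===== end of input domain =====

-- B replaces A's O(n) `del B[0]` inside the scan with an advancing index into a
-- sorted copy (two pointers); return-value equivalence only: A sorts/mutates its
-- arguments in place, B leaves them untouched.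

-- ===== PORT A =====
-- loop `for i in A: if i < B[0]: answer += 1; del B[0]`; none = IndexError on B[0]
def solutionLoop : List Int → Int → List Int → Option Int
  | [], ans, _ => some ans
  | i :: rest, ans, b =>
      match b with
      | [] => none
      | y :: bt => if i < y then solutionLoop rest (ans + 1) bt
                   else solutionLoop rest ans (y :: bt)

def solution (A : List Int) (B : List Int) : Int :=
  (solutionLoop (PySem.List.sorted A (fun x => x) true) 0
      (PySem.List.sorted B (fun x => x) true)).getD 0

-- ===== PORT B =====
-- loop `for x in a: if j < len(b) and x < b[j]: j += 1`
def solutionAltLoop (b : List Int) : List Int → Int → Int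
  | [], j => j
  | x :: rest, j =>
      if j < (b.length : Int) ∧ ((PySem.List.pyGet? b j).getD 0 > x) then
        solutionAltLoop b rest (j + 1)
      else
        solutionAltLoop b rest j

def solution_alt (A : List Int) (B : List Int) : Int :=
  let a := PySem.List.sorted A (fun x => x) true
  let b := PySem.List.sorted B (fun x => x) true
  solutionAltLoop b a 0

-- ===== PRECONDITION & SPEC =====
-- Pre_ excludes len(A) > len(B): there A may exhaust B and raise IndexError on B[0]
-- (the puzzle guarantees equal lengths); on some such inputs A still returns — see claim cites.
def Pre_solution (A : List Int) (B : List Int) : Prop := A.length ≤ B.length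
instance (A : List Int) (B : List Int) : Decidable (Pre_solution A B) := by
  unfold Pre_solution; infer_instance

def pvWitness_solution : List Int × List Int := ([3, 1, 2], [2, 5, 4])

def Spec_solution (A : List Int) (B : List Int) (out : Int) : Prop := out = solution_alt A B
instance (A : List Int) (B : List Int) (out : Int) : Decidable (Spec_solution A B out) := by
  unfold Spec_solution; infer_instance

-- ===== CLAIM (what is proved, stated in full; the proofs are below) =====
def Claim_equal_solution : Prop := ∀ (A : List Int) (B : List Int), Dom_solution A B → Pre_solution A B → Spec_solution A B (solution A B)

-- ===== LEMMAS AND PROOFS =====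

-- Invariant: A's remaining B-list is b with the first j elements consumed, and
-- A's answer equals B's pointer j; as long as the unprocessed part of a fits in
-- the rest of b, the two loops stay in lockstep and A never hits IndexError.
lemma loop_eq (b : List Int) :
    ∀ (a : List Int) (j : Nat), a.length + j ≤ b.length →
      solutionLoop a (j : Int) (b.drop j) = some (solutionAltLoop b a (j : Int)) := by
  intro a
  induction a with
  | nil => intro j _; simp [solutionLoop, solutionAltLoop]
  | cons x rest ih =>
      intro j h
      have hj : j < b.length := by simp at h; omega
      have hdrop : b.drop j = b[j] :: b.drop (j + 1) := List.drop_eq_getElem_cons hj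
      have hget : PySem.List.pyGet? b (j : Int) = some b[j] := by
        simp [PySem.List.pyGet?_natCast, List.getElem?_eq_getElem hj]
      rw [hdrop]
      simp only [solutionLoop, solutionAltLoop, hget]
      by_cases hx : x < b[j]
      · have hcond : ((j : Int) < (b.length : Int) ∧ (some b[j]).getD 0 > x) := by
          constructor
          · exact_mod_cast hj
          · simpa using hx
        rw [if_pos hx, if_pos hcond]
        have := ih (j + 1) (by simp at h ⊢; omega)
        push_cast at this ⊢
        exact this
      · have hcond : ¬ ((j : Int) < (b.length : Int) ∧ (some b[j]).getD 0 > x) := by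
          intro hc; exact hx (by simpa using hc.2)
        rw [if_neg hx, if_neg hcond, ← hdrop]
        exact ih j (by simp at h ⊢; omega)

-- ===== VERDICT (by name: the statement is the Claim_ definition above) =====
theorem solution_spec : Claim_equal_solution := by
  intro A B _ hpre
  unfold Spec_solution solution solution_alt
  have hlen : (PySem.List.sorted A (fun x => x) true).length
      = A.length := PySem.List.length_sorted ..
  have hlenB : (PySem.List.sorted B (fun x => x) true).length
      = B.length := PySem.List.length_sorted ..
  have h := loop_eq (PySem.List.sorted B (fun x => x) true)
      (PySem.List.sorted A (fun x => x) true) 0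
      (by rw [hlen, hlenB]; simpa [Pre_solution] using hpre)
  simpa using congrArg (Option.getD · 0) h
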